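-- pv_equiv track=rewrite | github.com/alysivji/advent-of-code | 2020/day13_shuttle.py | next_bus
-- ===== SOURCE A (Python) =====
-- def next_bus(buses, timestamp):
--     time_to_wait = []
--     for bus in buses:
--         num_trips = timestamp // bus
--         last_bus = num_trips * bus
--         time_to_wait.append(last_bus + bus - timestamp)
--
--     time_to_wait_for_next_bus = min(time_to_wait)
--     bus_number = buses[time_to_wait.index(time_to_wait_for_next_bus)]
--     return time_to_wait_for_next_bus * bus_number
-- ===== SOURCE B (Python) =====
-- def next_bus(buses, timestamp):
--     best_wait = None
--     best_bus = None
--     for bus in buses: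
--         wait = (timestamp // bus) * bus + bus - timestamp
--         if best_wait is None or wait < best_wait:
--             best_wait = wait
--             best_bus = bus
--     return best_wait * best_bus
-- ===== Notes on version B (the rewrite author's own statement) =====
-- stated objective: simpler
-- what changed: Replaces the three passes (build wait list, min, index-lookup) with a single loop tracking the best wait and its bus, with strict '<' preserving first-occurrence tie-breaking.
import Mathlib
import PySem

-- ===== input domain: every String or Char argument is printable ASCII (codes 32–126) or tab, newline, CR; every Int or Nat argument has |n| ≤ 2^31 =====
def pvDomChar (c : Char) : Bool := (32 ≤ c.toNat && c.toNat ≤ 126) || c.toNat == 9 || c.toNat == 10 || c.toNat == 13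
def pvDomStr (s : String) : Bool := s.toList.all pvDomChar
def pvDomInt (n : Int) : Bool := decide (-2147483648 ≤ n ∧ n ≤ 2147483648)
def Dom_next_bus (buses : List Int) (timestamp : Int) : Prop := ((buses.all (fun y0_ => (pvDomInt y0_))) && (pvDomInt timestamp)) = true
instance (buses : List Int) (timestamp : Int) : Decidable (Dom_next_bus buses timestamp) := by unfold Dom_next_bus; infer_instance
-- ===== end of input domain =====

-- B replaces A's three passes (build the wait list, min, index) by one loop tracking the
-- best (wait, bus) pair; objective: simpler. Return-value equivalence only (neither mutates).

-- ===== PORT A =====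
def next_bus (buses : List Int) (timestamp : Int) : Int :=
  let time_to_wait := buses.foldl (fun acc bus =>
    let num_trips := PySem.Int.floordiv timestamp bus
    let last_bus := num_trips * bus
    acc ++ [last_bus + bus - timestamp]) []
  match PySem.List.min? time_to_wait (fun x => x) with
  | none => 0   -- unreachable under Pre_ (min([]) raises ValueError)
  | some m =>
    match PySem.List.index? time_to_wait m with
    | none => 0 -- unreachable: the minimum is in the list
    | some i => m * ((PySem.List.pyGet? buses (i : Int)).getD 0)

-- ===== PORT B =====
def next_bus_alt (buses : List Int) (timestamp : Int) : Int :=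
  let best := buses.foldl (fun st bus =>
    let wait := (PySem.Int.floordiv timestamp bus) * bus + bus - timestamp
    match st with
    | none => some (wait, bus)
    | some (bw, bb) => if wait < bw then some (wait, bus) else some (bw, bb)) none
  match best with
  | some (bw, bb) => bw * bb
  | none => 0     -- unreachable under Pre_ (None * None raises TypeError)

-- ===== PRECONDITION & SPEC =====
-- A raises ValueError (min of empty list) on empty buses and ZeroDivisionError if any bus is 0.
def Pre_next_bus (buses : List Int) (timestamp : Int) : Prop :=
  buses ≠ [] ∧ ∀ b ∈ buses, b ≠ 0
instance (buses : List Int) (timestamp : Int) : Decidable (Pre_next_bus buses timestamp) := by unfold Pre_next_bus; infer_instance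
def pvWitness_next_bus : List Int × Int := ([7, 13, 59, 31, 19], 939)

def Spec_next_bus (buses : List Int) (timestamp : Int) (out : Int) : Prop := out = next_bus_alt buses timestamp
instance (buses : List Int) (timestamp : Int) (out : Int) : Decidable (Spec_next_bus buses timestamp out) := by unfold Spec_next_bus; infer_instance

-- ===== CLAIM (what is proved, stated in full; the proofs are below) =====
def Claim_equal_next_bus : Prop := ∀ (buses : List Int) (timestamp : Int), Dom_next_bus buses timestamp → Pre_next_bus buses timestamp → Spec_next_bus buses timestamp (next_bus buses timestamp)

-- ===== LEMMAS AND PROOFS =====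

-- the wait of one bus
def pvWait (timestamp bus : Int) : Int :=
  (PySem.Int.floordiv timestamp bus) * bus + bus - timestamp

-- A's list-building loop is a map
lemma pvA_list (timestamp : Int) (l : List Int) (acc : List Int) :
    l.foldl (fun acc bus =>
      let num_trips := PySem.Int.floordiv timestamp bus
      let last_bus := num_trips * bus
      acc ++ [last_bus + bus - timestamp]) acc = acc ++ l.map (pvWait timestamp) := by
  induction l generalizing acc with
  | nil => simp
  | cons b t ih => simp [ih, pvWait]

-- the selected bus, expressed from the index of the minimum in (bw :: waits)
def pvSel (bb : Int) (l : List Int) (j? : Option Nat) : Int :=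
  match j? with
  | some 0 => bb
  | some (j+1) => l.getD j 0
  | none => 0

-- characterisation of B's fold from a non-none state: first component = running min of the
-- waits with bw in front, second = the bus selected by the first index of that min
lemma pvB_fold (timestamp : Int) (f : Option (Int × Int) → Int → Option (Int × Int))
    (l : List Int) (bw bb : Int)
    (hf : ∀ x y bus, f (some (x, y)) bus =
      if pvWait timestamp bus < x then some (pvWait timestamp bus, bus) else some (x, y)) :
    l.foldl f (some (bw, bb))
    = some ((l.map (pvWait timestamp)).foldl min bw,
        pvSel bb l (PySem.List.index? (bw :: l.map (pvWait timestamp))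
          ((l.map (pvWait timestamp)).foldl min bw))) := by
  induction l generalizing bw bb with
  | nil =>
    simp only [List.foldl_nil, List.map_nil]
    rw [PySem.List.index?_cons_self]
    rfl
  | cons bus t ih =>
    rw [List.foldl_cons, hf bw bb bus]
    simp only [List.map_cons, List.foldl_cons]
    by_cases h : pvWait timestamp bus < bw
    · rw [if_pos h, ih]
      have hmin : min bw (pvWait timestamp bus) = pvWait timestamp bus := by omega
      rw [hmin]
      set M := (t.map (pvWait timestamp)).foldl min (pvWait timestamp bus) with hM
      have hle : M ≤ pvWait timestamp bus := (PySem.List.foldl_min_le _ _).1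
      have hne : bw ≠ M := by omega
      have hmem : M ∈ pvWait timestamp bus :: t.map (pvWait timestamp) := by
        rcases PySem.List.foldl_min_mem (t.map (pvWait timestamp)) (pvWait timestamp bus)
          with h1 | h1
        · rw [hM, h1]; exact List.mem_cons_self
        · rw [hM]; exact List.mem_cons_of_mem _ h1
      obtain ⟨j, hj⟩ := Option.isSome_iff_exists.mp
        ((PySem.List.index?_isSome_iff _ _).mpr hmem)
      rw [PySem.List.index?_cons_of_ne _ hne, hj]
      cases j with
      | zero => rfl
      | succ k => rfl
    · rw [if_neg h, ih]
      have hmin : min bw (pvWait timestamp bus) = bw := by omega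
      rw [hmin]
      set M := (t.map (pvWait timestamp)).foldl min bw with hM
      have hle : M ≤ bw := (PySem.List.foldl_min_le _ _).1
      by_cases heq : M = bw
      · rw [heq, PySem.List.index?_cons_self, PySem.List.index?_cons_self]
        rfl
      · have hmem : M ∈ t.map (pvWait timestamp) := by
          rcases PySem.List.foldl_min_mem (t.map (pvWait timestamp)) bw with h1 | h1
          · exact absurd (hM.trans h1) heq
          · rw [hM]; exact h1
        obtain ⟨j, hj⟩ := Option.isSome_iff_exists.mp
          ((PySem.List.index?_isSome_iff _ _).mpr hmem)
        have hne1 : bw ≠ M := fun hc => heq hc.symm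
        have hne2 : pvWait timestamp bus ≠ M := by omega
        rw [PySem.List.index?_cons_of_ne _ hne1, PySem.List.index?_cons_of_ne _ hne1,
            PySem.List.index?_cons_of_ne _ hne2, hj]
        rfl

theorem next_bus_spec : Claim_equal_next_bus := by
  intro buses timestamp _ hpre
  obtain ⟨hne, -⟩ := hpre
  obtain ⟨b, t, rfl⟩ : ∃ b t, buses = b :: t := by
    cases buses with
    | nil => exact absurd rfl hne
    | cons b t => exact ⟨b, t, rfl⟩
  unfold Spec_next_bus next_bus next_bus_alt
  rw [pvA_list]
  simp only [List.nil_append, List.map_cons, List.foldl_cons]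
  rw [show (PySem.Int.floordiv timestamp b) * b + b - timestamp
        = pvWait timestamp b from rfl]
  rw [PySem.List.min?_id_cons]
  rw [pvB_fold timestamp]
  case hf => intro x y bus; rfl
  set M := (t.map (pvWait timestamp)).foldl min (pvWait timestamp b) with hM
  have hmem : M ∈ pvWait timestamp b :: t.map (pvWait timestamp) := by
    rcases PySem.List.foldl_min_mem (t.map (pvWait timestamp)) (pvWait timestamp b)
      with h1 | h1
    · rw [hM, h1]; exact List.mem_cons_self
    · rw [hM]; exact List.mem_cons_of_mem _ h1
  obtain ⟨i, hi⟩ := Option.isSome_iff_exists.mp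
    ((PySem.List.index?_isSome_iff _ _).mpr hmem)
  simp only []
  rw [hi]
  obtain ⟨hilt, -, -⟩ := PySem.List.getElem_of_index?_eq_some hi
  cases i with
  | zero =>
    simp only []
    rw [PySem.List.pyGet?_natCast]
    simp [pvSel]
  | succ j =>
    have hjlt : j < t.length := by simpa using hilt
    simp only []
    rw [PySem.List.pyGet?_natCast]
    simp [pvSel, hjlt, List.getD_eq_getElem?_getD]
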